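-- pv_equiv track=rewrite | github.com/Okita-Laboratory/SENvT | sslearning/multitask.py | set_task_label
-- ===== SOURCE A (Python) =====
-- def set_task_label(task_dict):
--     task_label = {k: -1 for k in task_dict.keys()}
--     c = 0
--     for task in task_label.keys():
--         if task_dict[task]:
--             task_label[task] = c
--             c+=1
--     return task_label
-- ===== SOURCE B (Python) =====
-- def set_task_label(task_dict):
--     items = list(task_dict.items())
--     c = sum(1 for _, v in items if v)
--     out = []
--     for k, v in reversed(items):
--         if v:
--             c -= 1
--             out.append((k, c))
--         else:
--             out.append((k, -1))
--     return dict(reversed(out))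
-- ===== Notes on version B (the rewrite author's own statement) =====
-- stated objective: alternative
-- what changed: B builds the result back-to-front: it precomputes the total truthy count, then walks the items in reverse decrementing the counter to assign each truthy key its label, and constructs the dict from the reversed output, instead of A's forward pass incrementing a counter through in-place updates of a pre-initialised -1 dict.
import Mathlib
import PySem

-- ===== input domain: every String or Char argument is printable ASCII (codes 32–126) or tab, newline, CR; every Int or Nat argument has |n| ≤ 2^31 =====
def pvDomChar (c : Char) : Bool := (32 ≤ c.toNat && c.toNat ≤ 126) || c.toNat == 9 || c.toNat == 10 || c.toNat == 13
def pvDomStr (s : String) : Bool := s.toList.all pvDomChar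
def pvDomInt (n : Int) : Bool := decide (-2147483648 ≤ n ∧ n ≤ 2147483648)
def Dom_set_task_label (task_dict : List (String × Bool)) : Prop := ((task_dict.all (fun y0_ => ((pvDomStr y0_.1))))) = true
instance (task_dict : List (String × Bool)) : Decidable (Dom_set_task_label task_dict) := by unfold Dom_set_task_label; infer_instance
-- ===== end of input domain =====

-- B builds the result back-to-front: precomputed total truthy count, reverse walk decrementing the
-- counter, dict built from the reversed output; alternative decomposition, same cost as A.


-- ===== PORT A =====
-- task_label = {k: -1 for k in task_dict.keys()}; c = 0;
-- for task in task_label.keys(): if task_dict[task]: task_label[task] = c; c += 1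
-- task_dict[task] is ported as getD (the key is always present, so no KeyError arises).
def set_task_label (task_dict : List (String × Bool)) : List (String × Int) :=
  let td : PySem.Dict String Bool := PySem.Dict.mk task_dict
  let task_label : PySem.Dict String Int :=
    td.keys.foldl (fun d k => d.insert k (-1)) PySem.Dict.empty
  let res : PySem.Dict String Int × Int :=
    task_label.keys.foldl
      (fun st task => if td.getD task false then (st.1.insert task st.2, st.2 + 1) else st)
      (task_label, 0)
  res.1.items

-- ===== PORT B =====
-- items = list(task_dict.items()); c = sum(1 for _, v in items if v); out = []
-- for k, v in reversed(items): if v: c -= 1; out.append((k, c))  else: out.append((k, -1))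
-- return dict(reversed(out))
def set_task_label_alt (task_dict : List (String × Bool)) : List (String × Int) :=
  let items : List (String × Bool) := (PySem.Dict.mk task_dict).items
  let c : Int := ((items.filter (fun kv => kv.2)).map (fun _ => (1 : Int))).sum
  let res : Int × List (String × Int) :=
    items.reverse.foldl
      (fun st kv =>
        if kv.2 then (st.1 - 1, st.2 ++ [(kv.1, st.1 - 1)])
        else (st.1, st.2 ++ [(kv.1, (-1 : Int))]))
      (c, [])
  (PySem.Dict.ofList res.2.reverse).items

-- ===== PRECONDITION & SPEC =====
-- Pre_ requires distinct keys: the Python argument is a dict, in which duplicate keys cannot occur,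
-- so association lists with repeated keys represent no Python input at all.
def Pre_set_task_label (task_dict : List (String × Bool)) : Prop :=
  (task_dict.map Prod.fst).Nodup
instance (task_dict : List (String × Bool)) : Decidable (Pre_set_task_label task_dict) := by
  unfold Pre_set_task_label; infer_instance
def pvWitness_set_task_label : (List (String × Bool)) := [("a", false), ("b", true), ("c", true)]

def Spec_set_task_label (task_dict : List (String × Bool)) (out : List (String × Int)) : Prop := out = set_task_label_alt task_dict
instance (task_dict : List (String × Bool)) (out : List (String × Int)) : Decidable (Spec_set_task_label task_dict out) := by unfold Spec_set_task_label; infer_instance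

-- ===== CLAIM (what is proved, stated in full; the proofs are below) =====
def Claim_equal_set_task_label : Prop := ∀ (task_dict : List (String × Bool)), Dom_set_task_label task_dict → Pre_set_task_label task_dict → Spec_set_task_label task_dict (set_task_label task_dict)

-- ===== LEMMAS AND PROOFS =====

-- the canonical labelling: key k at position j gets the count of truthy entries strictly before j
-- (if truthy), else -1; c is the label of the next truthy key.
def pvCanon : List (String × Bool) → Int → List (String × Int)
  | [], _ => []
  | (k, v) :: T, c => (k, if v then c else -1) :: pvCanon T (if v then c + 1 else c)

theorem pvCanon_length (T : List (String × Bool)) (c : Int) :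
    (pvCanon T c).length = T.length := by
  induction T generalizing c with
  | nil => rfl
  | cons e T ih => obtain ⟨k, v⟩ := e; simp [pvCanon, ih]

theorem pvCanon_keys (T : List (String × Bool)) (c : Int) :
    (pvCanon T c).map Prod.fst = T.map Prod.fst := by
  induction T generalizing c with
  | nil => rfl
  | cons e T ih => obtain ⟨k, v⟩ := e; simp [pvCanon, ih]

theorem pvCanon_getElem (T : List (String × Bool)) (c : Int) (j : Nat) (h : j < T.length) :
    (pvCanon T c)[j]'(by rw [pvCanon_length]; exact h)
      = ((T[j]'h).1,
         if (T[j]'h).2 then c + (((T.take j).countP (fun q => q.2)) : Int) else -1) := by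
  induction T generalizing c j with
  | nil => cases h
  | cons e T ih =>
    obtain ⟨k, v⟩ := e
    cases j with
    | zero => simp [pvCanon]
    | succ j =>
      have hj : j < T.length := by simpa using h
      simp only [pvCanon, List.getElem_cons_succ]
      rw [ih (if v then c + 1 else c) j hj]
      have htake : (((k, v) :: T).take (j+1)) = (k, v) :: T.take j := rfl
      rw [htake, List.countP_cons]
      cases v <;> by_cases hv : (T[j]'hj).2 = true <;>
        simp [hv] <;> push_cast <;> ring

theorem pvCanon_append (T : List (String × Bool)) (e : String × Bool) (c : Int) :
    pvCanon (T ++ [e]) c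
      = pvCanon T c ++ [(e.1, if e.2 then c + ((T.countP (fun q => q.2)) : Int) else -1)] := by
  induction T generalizing c with
  | nil => obtain ⟨k, v⟩ := e; simp [pvCanon]
  | cons f T ih =>
    obtain ⟨k, v⟩ := f
    have hstep : pvCanon (((k, v) :: T) ++ [e]) c
        = (k, if v then c else -1) :: pvCanon (T ++ [e]) (if v then c + 1 else c) := rfl
    rw [hstep, ih, List.countP_cons]
    cases v <;> cases he : e.2 <;> simp [pvCanon] <;> push_cast <;> ring


theorem pvRevLoop (T : List (String × Bool)) (c : Int) (acc : List (String × Int)) :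
    T.reverse.foldl
      (fun st kv =>
        if kv.2 then (st.1 - 1, st.2 ++ [(kv.1, st.1 - 1)])
        else (st.1, st.2 ++ [(kv.1, (-1 : Int))]))
      (c + ((T.countP (fun q => q.2)) : Int), acc)
      = (c, acc ++ (pvCanon T c).reverse) := by
  induction T using List.reverseRecOn generalizing acc with
  | nil => simp [pvCanon]
  | append_singleton T e ih =>
    rw [List.reverse_append]
    simp only [List.reverse_cons, List.reverse_nil, List.nil_append, List.singleton_append,
      List.foldl_cons]
    rw [pvCanon_append]
    cases he : e.2 with
    | false =>
      simp only [he, Bool.false_eq_true, if_false]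
      have hc : (((T ++ [e]).countP (fun q => q.2)) : Int) = ((T.countP (fun q => q.2)) : Int) := by
        rw [List.countP_append]; simp [he]
      rw [hc, ih]
      simp
    | true =>
      simp only [he, if_true]
      have hc : c + (((T ++ [e]).countP (fun q => q.2)) : Int) - 1
          = c + ((T.countP (fun q => q.2)) : Int) := by
        rw [List.countP_append]; simp [he]; push_cast; ring
      rw [hc, ih]
      simp

-- A's loop, abstracted over the boolean lookup g.
def pvStep (g : String → Bool) (st : PySem.Dict String Int × Int) (task : String) :
    PySem.Dict String Int × Int :=
  if g task then (st.1.insert task st.2, st.2 + 1) else st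

theorem pvSnd_loop (g : String → Bool) (L : List String) (d : PySem.Dict String Int) (c : Int) :
    (L.foldl (pvStep g) (d, c)).2 = c + L.countP g := by
  induction L generalizing d c with
  | nil => simp
  | cons t L ih =>
    simp only [List.foldl_cons, List.countP_cons, pvStep]
    by_cases h : g t
    · simp [h, ih]; ring
    · simp [h, ih]

theorem pvGetD_loop_skip (g : String → Bool) (L : List String) (d : PySem.Dict String Int)
    (c : Int) (k : String) (h : g k = false ∨ k ∉ L) :
    ((L.foldl (pvStep g) (d, c)).1).getD k (-1) = d.getD k (-1) := by
  induction L generalizing d c with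
  | nil => simp
  | cons t L ih =>
    simp only [List.foldl_cons, pvStep]
    by_cases ht : g t
    · simp only [ht, if_true]
      rcases h with h | h
      · rw [ih _ _ (Or.inl h)]
        exact PySem.Dict.getD_insert_of_ne d c (-1) (fun he => by rw [he] at h; rw [h] at ht; cases ht)
      · have hk : k ≠ t := fun he => h (by simp [he])
        rw [ih _ _ (Or.inr (fun hm => h (List.mem_cons_of_mem _ hm)))]
        exact PySem.Dict.getD_insert_of_ne d c (-1) hk
    · simp only [ht, Bool.false_eq_true, if_false]
      rcases h with h | h
      · exact ih _ _ (Or.inl h)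
      · exact ih _ _ (Or.inr (fun hm => h (List.mem_cons_of_mem _ hm)))

theorem pvGetD_loop_hit (g : String → Bool) (L1 L2 : List String) (k : String)
    (d : PySem.Dict String Int) (c : Int) (hk2 : k ∉ L2) (hgk : g k = true) :
    (((L1 ++ k :: L2).foldl (pvStep g) (d, c)).1).getD k (-1) = c + L1.countP g := by
  rw [List.foldl_append]
  set st1 := L1.foldl (pvStep g) (d, c) with hst1
  have hsnd : st1.2 = c + L1.countP g := pvSnd_loop g L1 d c
  simp only [List.foldl_cons, pvStep, hgk, if_true]
  rw [pvGetD_loop_skip g L2 _ _ k (Or.inr hk2)]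
  rw [PySem.Dict.getD_insert_self, hsnd]

theorem pvKeys_loop (g : String → Bool) (L : List String) (d : PySem.Dict String Int) (c : Int)
    (h : ∀ t ∈ L, d.contains t = true) :
    ((L.foldl (pvStep g) (d, c)).1).keys = d.keys := by
  induction L generalizing d c with
  | nil => simp
  | cons t L ih =>
    simp only [List.foldl_cons, pvStep]
    by_cases ht : g t
    · simp only [ht, if_true]
      rw [ih]
      · exact PySem.Dict.keys_insert_of_contains d c (h t (by simp))
      · intro u hu
        rw [PySem.Dict.contains_insert]
        simp [h u (List.mem_cons_of_mem _ hu)]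
    · simp only [ht, Bool.false_eq_true, if_false]
      exact ih _ _ (fun u hu => h u (List.mem_cons_of_mem _ hu))

theorem pvCountP_keys (g : String → Bool) (T : List (String × Bool))
    (hg : ∀ p ∈ T, g p.1 = p.2) :
    (T.map Prod.fst).countP g = T.countP (fun p => p.2) := by
  induction T with
  | nil => simp
  | cons p T ih =>
    simp only [List.map_cons, List.countP_cons]
    rw [hg p (by simp), ih (fun q hq => hg q (List.mem_cons_of_mem _ hq))]

theorem set_task_label_spec : Claim_equal_set_task_label := by
  intro task_dict _ hpre
  have hnd : (task_dict.map Prod.fst).Nodup := hpre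
  simp only [Spec_set_task_label, set_task_label, set_task_label_alt]
  have hitems : (PySem.Dict.mk task_dict).items = task_dict := rfl
  have hkeys : (PySem.Dict.mk task_dict).keys = task_dict.map Prod.fst :=
    PySem.Dict.keys_mk task_dict
  have hndk : (PySem.Dict.mk task_dict).keys.Nodup := by rw [hkeys]; exact hnd
  rw [hkeys]
  set L : List String := task_dict.map Prod.fst with hL
  set g : String → Bool := fun t => (PySem.Dict.mk task_dict).getD t false with hgdef
  have hg : ∀ p ∈ task_dict, g p.1 = p.2 := by
    intro p hp
    exact PySem.Dict.getD_of_mem_items _ (by rw [hitems]; exact hp) hndk false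
  -- the -1-initialised dict
  set d0 : PySem.Dict String Int :=
    L.foldl (fun d k => d.insert k (-1)) PySem.Dict.empty with hd0
  have hd0items : d0.items = L.map (fun k => (k, (-1 : Int))) := by
    rw [hd0]
    simpa using
      PySem.Dict.items_foldl_insert_fresh L (fun a => a) (fun _ => (-1 : Int))
        PySem.Dict.empty (by simp) (by simpa using hnd)
  have hd0keys : d0.keys = L := by
    show d0.items.map (fun x => x.1) = L
    rw [hd0items]; simp [Function.comp_def]
  have hd0getD : ∀ k ∈ L, d0.getD k (-1) = -1 := by
    intro k hk
    exact PySem.Dict.getD_of_mem_items d0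
      (by rw [hd0items]; exact List.mem_map.2 ⟨k, hk, rfl⟩) (by rw [hd0keys]; exact hnd) (-1)
  rw [hd0keys]
  -- A's loop result
  set fin : PySem.Dict String Int × Int :=
    L.foldl (fun st task => if (PySem.Dict.mk task_dict).getD task false
      then (st.1.insert task st.2, st.2 + 1) else st) (d0, 0) with hfin
  have hfinstep : fin = L.foldl (pvStep g) (d0, 0) := rfl
  have hfinkeys : fin.1.keys = L := by
    rw [hfinstep, pvKeys_loop g L d0 0 ?_, hd0keys]
    intro t ht
    rw [PySem.Dict.contains_iff_mem_keys, hd0keys]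
    exact ht
  have hANodup : fin.1.keys.Nodup := by rw [hfinkeys]; exact hnd
  have hA : fin.1.items = L.map (fun k => (k, fin.1.getD k (-1))) := by
    rw [PySem.Dict.items_eq_map_keys fin.1 hANodup (-1), hfinkeys]
  -- A's items are the canonical labelling
  have hAc : fin.1.items = pvCanon task_dict 0 := by
    rw [hA]
    apply List.ext_getElem
    · simp [hL, pvCanon_length]
    intro j hj1 hj2
    have hjlen : j < task_dict.length := by simpa [pvCanon_length] using hj2
    rw [List.getElem_map, pvCanon_getElem task_dict 0 j hjlen]
    have hmem : task_dict[j]'hjlen ∈ task_dict := List.getElem_mem hjlen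
    have hge : g (task_dict[j]'hjlen).1 = (task_dict[j]'hjlen).2 := hg _ hmem
    have hdropj : task_dict.drop j = (task_dict[j]'hjlen) :: task_dict.drop (j + 1) :=
      List.drop_eq_getElem_cons hjlen
    have hT : task_dict = task_dict.take j ++ (task_dict[j]'hjlen) :: task_dict.drop (j + 1) := by
      conv_lhs => rw [← List.take_append_drop j task_dict, hdropj]
    have hsplit : L = (task_dict.take j).map Prod.fst
        ++ (task_dict[j]'hjlen).1 :: (task_dict.drop (j + 1)).map Prod.fst := by
      rw [hL]; conv_lhs => rw [hT]
      rw [List.map_append, List.map_cons]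
    have hnd2 : ((task_dict.take j).map Prod.fst
        ++ (task_dict[j]'hjlen).1 :: (task_dict.drop (j + 1)).map Prod.fst).Nodup :=
      hsplit ▸ hnd
    rcases List.nodup_append.1 hnd2 with ⟨h1, h2, hdisj⟩
    have hk2 : (task_dict[j]'hjlen).1 ∉ (task_dict.drop (j + 1)).map Prod.fst :=
      (List.nodup_cons.1 h2).1
    have hLj : L[j]'(by simpa [hL] using hjlen) = (task_dict[j]'hjlen).1 := by simp [hL]
    rw [hLj]
    cases hv : (task_dict[j]'hjlen).2 with
    | false =>
      have hAv : fin.1.getD (task_dict[j]'hjlen).1 (-1) = -1 := by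
        rw [hfinstep, pvGetD_loop_skip g L d0 0 _ (Or.inl (by rw [hge, hv]))]
        exact hd0getD _ (by rw [hL]; exact List.mem_map.2 ⟨_, hmem, rfl⟩)
      simp [hAv, hv]
    | true =>
      have hAv : fin.1.getD (task_dict[j]'hjlen).1 (-1)
          = 0 + (((task_dict.take j).map Prod.fst).countP g : Int) := by
        rw [hfinstep, hsplit]
        exact pvGetD_loop_hit g _ _ _ d0 0 hk2 (by rw [hge, hv])
      have hcnt : ((task_dict.take j).map Prod.fst).countP g
          = (task_dict.take j).countP (fun p => p.2) :=
        pvCountP_keys g _ (fun q hq => hg q (by rw [hT]; exact List.mem_append_left _ hq))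
      simp [hAv, hv]
      rw [← List.map_take]
      exact hcnt
  -- B's result is the canonical labelling too
  have hc0 : ((task_dict.filter (fun kv => kv.2)).map (fun _ => (1 : Int))).sum
      = 0 + ((task_dict.countP (fun q => q.2)) : Int) := by
    rw [PySem.List.sum_map_const_int, List.countP_eq_length_filter]
    push_cast; ring
  rw [hc0, pvRevLoop task_dict 0 []]
  simp only [List.nil_append, List.reverse_reverse]
  have hofl : PySem.Dict.ofList (pvCanon task_dict 0)
      = (pvCanon task_dict 0).foldl (fun d p => d.insert p.1 p.2) PySem.Dict.empty := rfl
  have hndc : ((pvCanon task_dict 0).map Prod.fst).Nodup := by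
    rw [pvCanon_keys]; exact hnd
  have hBitems : (PySem.Dict.ofList (pvCanon task_dict 0)).items = pvCanon task_dict 0 := by
    rw [hofl]
    simpa using
      PySem.Dict.items_foldl_insert_fresh (pvCanon task_dict 0) Prod.fst Prod.snd
        PySem.Dict.empty (by simp) hndc
  rw [hBitems, ← hAc]
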